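-- pv_equiv track=rewrite | github.com/IliaTetin/Advanced-python | Yandex algo 3/29. Кафе.py | dp
-- ===== SOURCE A (Python) =====
-- inf = 1000000
--
-- def dp(i, j, dp_table, cost_list):
--     if j > i:
--         return inf
--     elif dp_table[i][j] != -1:
--         return dp_table[i][j]
--     else:
--         cost = cost_list[i]
--         if j <= 0:
--             if i >= 1:
--                 if cost <= 100:
--                     dif = min(dp(i-1, j+1, dp_table, cost_list), dp(i-1, j, dp_table, cost_list) + cost)
--                     res = dif
--                 else:
--                     res = dp(i-1, j+1, dp_table, cost_list)
--             else:
--                 res = 0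
--         else:
--             if cost > 100:
--                 dif = min(dp(i-1, j+1, dp_table, cost_list), dp(i-1, j-1, dp_table, cost_list) + cost)
--                 res = dif
--             else:
--                 dif = min(dp(i-1, j+1, dp_table, cost_list), dp(i-1, j, dp_table, cost_list) + cost)
--                 res = dif
--         dp_table[i][j] = res
--         return res
-- ===== SOURCE B (Python) =====
-- inf = 1000000
--
-- def dp(i, j, dp_table, cost_list):
--     # Bottom-up: sweep rows 0..i keeping only the previous row; does not mutate dp_table.
--     if j > i:
--         return inf
--     prev = []
--     for k in range(i + 1):
--         cur = []
--         for c in range(k + 1):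
--             cached = dp_table[k][c]
--             if cached != -1:
--                 cur.append(cached)
--             else:
--                 g = lambda cc: prev[cc] if cc < len(prev) else inf
--                 if c == 0:
--                     if k >= 1:
--                         cost = cost_list[k]
--                         if cost <= 100:
--                             val = min(g(1), g(0) + cost)
--                         else:
--                             val = g(1)
--                     else:
--                         val = 0
--                 else:
--                     cost = cost_list[k]
--                     if cost > 100:
--                         val = min(g(c + 1), g(c - 1) + cost)
--                     else:
--                         val = min(g(c + 1), g(c) + cost)
--                 cur.append(val)
--         prev = cur
--     return prev[j]
-- ===== Notes on version B (the rewrite author's own statement) =====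
-- stated objective: alternative
-- what changed: Replaces A's top-down memoized recursion (which writes into dp_table) with an iterative bottom-up sweep over rows 0..i that keeps only the previous row, respecting pre-filled (!= -1) cache cells; return value only, B does not mutate dp_table.
-- outside the precondition, e.g. on dp(1, -1, [[5, 7], [3, 4, 9]], [50, 50]): A returns 9, B returns 4; on dp(1, 0, [[], [5]], [50]): A returns 5, B raises IndexError; on dp(1, 1, [[7], [-1, 9]], []): A returns 9, B raises IndexError
import Mathlib
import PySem

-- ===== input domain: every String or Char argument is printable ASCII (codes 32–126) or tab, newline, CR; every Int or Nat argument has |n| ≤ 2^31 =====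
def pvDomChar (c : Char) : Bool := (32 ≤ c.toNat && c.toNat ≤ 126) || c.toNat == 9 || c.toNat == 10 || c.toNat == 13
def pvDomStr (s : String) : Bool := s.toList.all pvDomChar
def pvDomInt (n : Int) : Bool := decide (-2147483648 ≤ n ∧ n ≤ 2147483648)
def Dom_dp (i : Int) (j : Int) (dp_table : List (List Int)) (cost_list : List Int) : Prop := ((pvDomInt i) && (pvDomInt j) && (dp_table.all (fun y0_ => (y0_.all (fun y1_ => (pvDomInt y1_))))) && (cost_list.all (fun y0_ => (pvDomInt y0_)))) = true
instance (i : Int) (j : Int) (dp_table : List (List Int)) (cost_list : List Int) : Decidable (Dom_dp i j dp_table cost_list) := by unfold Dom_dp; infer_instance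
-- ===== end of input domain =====

-- B replaces A's top-down memoized recursion by an iterative bottom-up row sweep (alternative
-- decomposition, same cost); equivalence is about the RETURN value only: Python A mutates
-- dp_table (memo writes), B does not.


-- ===== PORT A =====
-- Literal port of A's memoized recursion; memo WRITES are dropped (they store exactly the value
-- the pure recursion recomputes, so the return value is unchanged); reads use pyGetD, exact
-- under Pre_ (indices in range).
def dp (i : Int) (j : Int) (dp_table : List (List Int)) (cost_list : List Int) : Int :=
  if _hj : j > i then 1000000
  else
    let cached := PySem.List.pyGetD (PySem.List.pyGetD dp_table i []) j 0
    if cached ≠ -1 then cached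
    else
      let cost := PySem.List.pyGetD cost_list i 0
      if hj0 : j ≤ 0 then
        if hi : i ≥ 1 then
          if cost ≤ 100 then
            min (dp (i-1) (j+1) dp_table cost_list) (dp (i-1) j dp_table cost_list + cost)
          else dp (i-1) (j+1) dp_table cost_list
        else 0
      else
        if cost > 100 then
          min (dp (i-1) (j+1) dp_table cost_list) (dp (i-1) (j-1) dp_table cost_list + cost)
        else
          min (dp (i-1) (j+1) dp_table cost_list) (dp (i-1) j dp_table cost_list + cost)
termination_by i.toNat
decreasing_by all_goals omega

-- ===== PORT B =====
def dp_alt (i : Int) (j : Int) (dp_table : List (List Int)) (cost_list : List Int) : Int :=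
  if j > i then 1000000
  else
    let prev :=
      (List.range (i.toNat + 1)).foldl (fun prev k =>
        (List.range (k + 1)).foldl (fun cur c =>
          let cached := (dp_table.getD k []).getD c 0
          cur ++ [if cached ≠ -1 then cached
            else
              let g := fun (cc : Nat) => if cc < prev.length then prev.getD cc 0 else 1000000
              if c = 0 then
                if k ≥ 1 then
                  let cost := cost_list.getD k 0
                  if cost ≤ 100 then min (g 1) (g 0 + cost) else g 1
                else 0
              else
                let cost := cost_list.getD k 0
                if cost > 100 then min (g (c+1)) (g (c-1) + cost)
                else min (g (c+1)) (g c + cost)]) []) []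
    PySem.List.pyGetD prev j 0

-- ===== PRECONDITION & SPEC =====
-- Pre_ excludes inputs on which A still returns a value in three accidental-corner ways:
-- negative j (A's cache read then uses Python wraparound indexing), and tables/cost lists too
-- short for the full 0..i triangle on which A happens to return only because pre-filled
-- (≠ -1) cache cells short-circuit the reads, while B's bottom-up sweep touches every cell.
def Pre_dp (i : Int) (j : Int) (dp_table : List (List Int)) (cost_list : List Int) : Prop :=
  j > i ∨ (0 ≤ j ∧ j ≤ i ∧ i < (dp_table.length : Int) ∧ i < (cost_list.length : Int) ∧
    ∀ k ∈ List.range (i.toNat + 1), k < (dp_table.getD k []).length)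
instance (i : Int) (j : Int) (dp_table : List (List Int)) (cost_list : List Int) : Decidable (Pre_dp i j dp_table cost_list) := by unfold Pre_dp; infer_instance

def pvWitness_dp : Int × Int × List (List Int) × List Int := (1, 0, [[-1, -1], [-1, -1]], [50, 150])

def Spec_dp (i : Int) (j : Int) (dp_table : List (List Int)) (cost_list : List Int) (out : Int) : Prop := out = dp_alt i j dp_table cost_list
instance (i : Int) (j : Int) (dp_table : List (List Int)) (cost_list : List Int) (out : Int) : Decidable (Spec_dp i j dp_table cost_list out) := by unfold Spec_dp; infer_instance

-- ===== CLAIM (what is proved, stated in full; the proofs are below) =====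
def Claim_equal_dp : Prop := ∀ (i : Int) (j : Int) (dp_table : List (List Int)) (cost_list : List Int), Dom_dp i j dp_table cost_list → Pre_dp i j dp_table cost_list → Spec_dp i j dp_table cost_list (dp i j dp_table cost_list)

-- ===== LEMMAS AND PROOFS =====

/-- Appending singletons in a fold builds `acc ++ map`. -/
theorem foldl_app_single {α β : Type} (l : List α) (h : α → β) (acc : List β) :
    l.foldl (fun cur c => cur ++ [h c]) acc = acc ++ l.map h := by
  induction l generalizing acc with
  | nil => simp
  | cons x xs ih => simp [ih]

/-- One row of B's sweep computes row `k` of A's recursion, given the previous row. -/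
theorem row_eq (dp_table : List (List Int)) (cost_list : List Int) (k : Nat)
    (prev : List Int)
    (hprev : prev = (List.range k).map (fun cc : Nat => dp ((k : Int) - 1) (cc : Int) dp_table cost_list)) :
    (List.range (k + 1)).foldl (fun cur c =>
        let cached := (dp_table.getD k []).getD c 0
        cur ++ [if cached ≠ -1 then cached
          else
            let g := fun (cc : Nat) => if cc < prev.length then prev.getD cc 0 else 1000000
            if c = 0 then
              if k ≥ 1 then
                let cost := cost_list.getD k 0
                if cost ≤ 100 then min (g 1) (g 0 + cost) else g 1
              else 0
            else
              let cost := cost_list.getD k 0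
              if cost > 100 then min (g (c+1)) (g (c-1) + cost)
              else min (g (c+1)) (g c + cost)]) []
    = (List.range (k + 1)).map (fun cc : Nat => dp (k : Int) (cc : Int) dp_table cost_list) := by
  rw [foldl_app_single]
  rw [List.nil_append]
  apply List.map_congr_left
  intro c hc
  have hck : c ≤ k := by
    have := List.mem_range.mp hc; omega
  have hlen : prev.length = k := by simp [hprev]
  -- the previous row, read the way B reads it, is A's recursion at row k-1
  have hg : ∀ cc : Nat, (if cc < prev.length then prev[cc]?.getD 0 else (1000000 : Int))
      = dp ((k : Int) - 1) (cc : Int) dp_table cost_list := by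
    intro cc
    by_cases h : cc < prev.length
    · rw [if_pos h, List.getElem?_eq_getElem h, Option.getD_some]
      subst hprev
      simp
    · rw [if_neg h, dp, dif_pos (by omega : ((cc : Int) > (k : Int) - 1))]
  -- unfold one step of A's recursion at (k, c)
  rw [dp]
  rw [dif_neg (by omega : ¬ ((c : Int) > (k : Int)))]
  simp only [PySem.List.pyGetD_natCast, List.getD_eq_getElem?_getD]
  refine if_congr Iff.rfl rfl ?_
  simp only [hg]
  by_cases hc0 : c = 0
  · subst hc0
    rw [if_pos rfl, dif_pos (by norm_num : ((0 : Nat) : Int) ≤ 0)]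
    by_cases hk1 : k ≥ 1
    · rw [if_pos hk1, dif_pos (by omega : (1 : Int) ≤ (k : Int))]
      have h1 : ((1 : Nat) : Int) = ((0 : Nat) : Int) + 1 := by norm_num
      rw [h1]
    · rw [if_neg hk1, dif_neg (by omega : ¬ ((1 : Int) ≤ (k : Int)))]
  · rw [if_neg hc0, dif_neg (by omega : ¬ ((c : Int) ≤ 0))]
    have hp1 : ((c + 1 : Nat) : Int) = (c : Int) + 1 := by omega
    have hm1 : ((c - 1 : Nat) : Int) = (c : Int) - 1 := by omega
    rw [hp1, hm1]

/-- B's outer fold over the first `n` rows is row `n - 1` of A's recursion. -/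
theorem rows_eq (dp_table : List (List Int)) (cost_list : List Int) (n : Nat) :
    (List.range n).foldl (fun prev k =>
      (List.range (k + 1)).foldl (fun cur c =>
        let cached := (dp_table.getD k []).getD c 0
        cur ++ [if cached ≠ -1 then cached
          else
            let g := fun (cc : Nat) => if cc < prev.length then prev.getD cc 0 else 1000000
            if c = 0 then
              if k ≥ 1 then
                let cost := cost_list.getD k 0
                if cost ≤ 100 then min (g 1) (g 0 + cost) else g 1
              else 0
            else
              let cost := cost_list.getD k 0
              if cost > 100 then min (g (c+1)) (g (c-1) + cost)
              else min (g (c+1)) (g c + cost)]) []) []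
    = (List.range n).map (fun cc : Nat => dp ((n : Int) - 1) (cc : Int) dp_table cost_list) := by
  induction n with
  | zero => simp
  | succ m ih =>
    rw [List.range_succ, List.foldl_append, List.foldl_cons, List.foldl_nil, ih]
    rw [row_eq dp_table cost_list m _ rfl]
    have hm : ((m + 1 : Nat) : Int) - 1 = (m : Int) := by omega
    rw [hm, List.range_succ]

-- ===== VERDICT (by name: the statement is the Claim_ definition above) =====
theorem dp_spec : Claim_equal_dp := by
  intro i j dp_table cost_list _hdom hpre
  unfold Spec_dp dp_alt
  by_cases hj : j > i
  · rw [if_pos hj, dp, dif_pos hj]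
  · rw [if_neg hj]
    rcases hpre with hpre | ⟨hj0, hji, _, _, _⟩
    · exact absurd hpre hj
    simp only []
    rw [rows_eq dp_table cost_list (i.toNat + 1)]
    have hiv : ((i.toNat + 1 : Nat) : Int) - 1 = i := by omega
    rw [hiv]
    have hjlt : j.toNat < i.toNat + 1 := by omega
    rw [PySem.List.pyGetD_eq_getElem _ _ hj0 (by simp; omega)]
    rw [List.getElem_map, List.getElem_range]
    have h1 : ((j.toNat : Nat) : Int) = j := by omega
    rw [h1]
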